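-- pv_equiv track=rewrite | github.com/fxrcode/LeetPy | WC/WC_292_May7.py | countTexts
-- ===== SOURCE A (Python) =====
-- def countTexts(pressedKeys: str) -> int:
--     four = "79"
--
--     def bt(i, path, res):
--         if i == len(pressedKeys):
--             res[0] += 1
--             return
--         if pressedKeys[i] in four:
--             for streak in range(1, 5):
--                 if (
--                     i + streak <= len(pressedKeys)
--                     and len(set(pressedKeys[i : i + streak])) == 1
--                 ):
--                     bt(i + streak, path + [pressedKeys[i : i + streak]], res)
--         else:
--             for streak in range(1, 4):
--                 if (
--                     i + streak <= len(pressedKeys)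
--                     and len(set(pressedKeys[i : i + streak])) == 1
--                 ):
--                     bt(i + streak, path + [pressedKeys[i : i + streak]], res)
--
--     res = [0]
--     bt(0, [], res)
--     return res[0] % (10**9 + 7)
-- ===== SOURCE B (Python) =====
-- def countTexts(pressedKeys: str) -> int:
--     # Linear DP from the right: dp[i] = number of decodings of pressedKeys[i:].
--     n = len(pressedKeys)
--     MOD = 10 ** 9 + 7
--     dp = [0] * (n + 1)
--     dp[n] = 1
--     for i in range(n - 1, -1, -1):
--         limit = 4 if pressedKeys[i] in "79" else 3
--         total = 0
--         j = i
--         while j < n and pressedKeys[j] == pressedKeys[i] and j - i < limit: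
--             total += dp[j + 1]
--             j += 1
--         dp[i] = total
--     return dp[0] % MOD
-- ===== Notes on version B (the rewrite author's own statement) =====
-- stated objective: faster
-- what changed: A enumerates every decoding by recursive backtracking over all streak splits (exponential); B computes the number of decodings of each suffix once with a right-to-left linear DP (dp[i] = sum of dp[i+k] over the run of equal keys capped at 3 or 4).
import Mathlib
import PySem

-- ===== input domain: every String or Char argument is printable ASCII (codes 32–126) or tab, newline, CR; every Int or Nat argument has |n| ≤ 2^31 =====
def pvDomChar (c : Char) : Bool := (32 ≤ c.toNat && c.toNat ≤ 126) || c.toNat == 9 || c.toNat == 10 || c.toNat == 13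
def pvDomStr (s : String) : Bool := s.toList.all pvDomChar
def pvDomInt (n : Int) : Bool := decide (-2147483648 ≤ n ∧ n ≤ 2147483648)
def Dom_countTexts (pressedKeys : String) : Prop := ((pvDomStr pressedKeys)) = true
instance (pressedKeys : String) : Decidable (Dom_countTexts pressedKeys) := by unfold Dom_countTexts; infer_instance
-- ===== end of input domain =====

-- B re-implements A's exponential backtracking enumeration as a right-to-left linear DP
-- over suffixes (dp[i] = decodings of s[i:]); same return value, asymptotically faster.

-- ===== PORT A =====
-- condition of A's inner `if`: i + streak <= len(pressedKeys) and len(set(pressedKeys[i:i+streak])) == 1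
abbrev okA (s : List Char) (i k : Nat) : Prop :=
  i + k ≤ s.length ∧
    (PySem.Set.ofList (PySem.List.slice s (some (i : Int)) (some ((i : Int) + (k : Int))))).length = 1

-- bt(i, path, res): res is the single mutable cell res[0], threaded through; the constant-bound
-- loops `for streak in range(1, 5)` / `range(1, 4)` are unrolled (4 resp. 3 guarded steps).
def btA (s : List Char) (i : Nat) (path : List (List Char)) (res : Int) : Int :=
  if i = s.length then res + 1
  else if PySem.List.pyGetD s (i : Int) ' ' ∈ ['7', '9'] then
    let r1 := if h : okA s i 1 then
      btA s (i+1) (path ++ [PySem.List.slice s (some (i : Int)) (some ((i : Int) + (1 : Int)))]) res else res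
    let r2 := if h : okA s i 2 then
      btA s (i+2) (path ++ [PySem.List.slice s (some (i : Int)) (some ((i : Int) + (2 : Int)))]) r1 else r1
    let r3 := if h : okA s i 3 then
      btA s (i+3) (path ++ [PySem.List.slice s (some (i : Int)) (some ((i : Int) + (3 : Int)))]) r2 else r2
    if h : okA s i 4 then
      btA s (i+4) (path ++ [PySem.List.slice s (some (i : Int)) (some ((i : Int) + (4 : Int)))]) r3 else r3
  else
    let r1 := if h : okA s i 1 then
      btA s (i+1) (path ++ [PySem.List.slice s (some (i : Int)) (some ((i : Int) + (1 : Int)))]) res else res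
    let r2 := if h : okA s i 2 then
      btA s (i+2) (path ++ [PySem.List.slice s (some (i : Int)) (some ((i : Int) + (2 : Int)))]) r1 else r1
    if h : okA s i 3 then
      btA s (i+3) (path ++ [PySem.List.slice s (some (i : Int)) (some ((i : Int) + (3 : Int)))]) r2 else r2
termination_by s.length - i
decreasing_by all_goals (have := h.1; omega)

def countTexts (pressedKeys : String) : Int :=
  PySem.Int.mod (btA pressedKeys.toList 0 [] 0) (10 ^ 9 + 7)

-- ===== PORT B =====
-- the `while j < n and pressedKeys[j] == pressedKeys[i] and j - i < limit: total += dp[j+1]` loop;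
-- `rest` is the dp slice for positions i+1..n, so dp[j+1] is rest[j-i].
def wsumB (s : List Char) (i j limit : Nat) (rest : List Int) : Int :=
  if h : j < s.length ∧ s.getD j ' ' = s.getD i ' ' ∧ j - i < limit then
    rest.getD (j - i) 0 + wsumB s i (j+1) limit rest
  else 0
termination_by i + limit - j
decreasing_by have := h.2.2; omega

-- dp built from the right: the `for i in range(n-1, -1, -1)` loop as structural recursion on
-- the suffix; dpB s i is the list [dp[i], dp[i+1], ..., dp[n]].
def dpB (s : List Char) (i : Nat) : List Int :=
  if h : s.length ≤ i then [1]
  else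
    let rest := dpB s (i+1)
    let limit : Nat := if s.getD i ' ' ∈ ['7', '9'] then 4 else 3
    wsumB s i i limit rest :: rest
termination_by s.length - i

def countTexts_alt (pressedKeys : String) : Int :=
  PySem.Int.mod ((dpB pressedKeys.toList 0).getD 0 0) (10 ^ 9 + 7)

-- ===== PRECONDITION & SPEC =====
def Spec_countTexts (pressedKeys : String) (out : Int) : Prop := out = countTexts_alt pressedKeys
instance (pressedKeys : String) (out : Int) : Decidable (Spec_countTexts pressedKeys out) := by unfold Spec_countTexts; infer_instance

-- ===== CLAIM (what is proved, stated in full; the proofs are below) =====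
def Claim_equal_countTexts : Prop := ∀ (pressedKeys : String), Dom_countTexts pressedKeys → Spec_countTexts pressedKeys (countTexts pressedKeys)

-- ===== LEMMAS AND PROOFS =====

-- number of decodings of the suffix starting at i, as A computes it
def cntA (s : List Char) (i : Nat) : Int := btA s i [] 0

theorem btA_ge (s : List Char) (i : Nat) (path : List (List Char)) (res : Int)
    (h : s.length ≤ i) : btA s i path res = res + cntA s i := by
  have nk : ∀ k, 1 ≤ k → ¬ okA s i k := by
    intro k hk hc
    rcases Nat.eq_or_lt_of_le h with he | hlt
    · have := hc.1; omega
    · have := hc.1; omega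
  by_cases hi : i = s.length
  · rw [cntA]
    conv_lhs => rw [btA]
    conv_rhs => rw [btA]
    simp only [if_pos hi]
    ring
  · have h1 := nk 1 (by omega)
    have h2 := nk 2 (by omega)
    have h3 := nk 3 (by omega)
    have h4 := nk 4 (by omega)
    rw [cntA]
    conv_lhs => rw [btA]
    conv_rhs => rw [btA]
    simp only [if_neg hi, dif_neg h1, dif_neg h2, dif_neg h3, dif_neg h4]
    split_ifs <;> ring

theorem btA_accAux (s : List Char) :
    ∀ (d i : Nat) (path : List (List Char)) (res : Int), s.length - i ≤ d →
      btA s i path res = res + cntA s i := by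
  intro d
  induction d with
  | zero => intro i path res hd; exact btA_ge s i path res (by omega)
  | succ d ih =>
    intro i path res hd
    by_cases hge : s.length ≤ i
    · exact btA_ge s i path res hge
    · have e1 : ∀ p r, btA s (i+1) p r = r + cntA s (i+1) := fun p r => ih (i+1) p r (by omega)
      have e2 : ∀ p r, btA s (i+2) p r = r + cntA s (i+2) := fun p r => ih (i+2) p r (by omega)
      have e3 : ∀ p r, btA s (i+3) p r = r + cntA s (i+3) := fun p r => ih (i+3) p r (by omega)
      have e4 : ∀ p r, btA s (i+4) p r = r + cntA s (i+4) := fun p r => ih (i+4) p r (by omega)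
      rw [cntA]
      conv_lhs => rw [btA]
      conv_rhs => rw [btA]
      simp only [if_neg (show ¬ i = s.length by omega)]
      split_ifs <;> (try simp only [e1, e2, e3, e4]) <;> ring


theorem btA_acc (s : List Char) (i : Nat) (path : List (List Char)) (res : Int) :
    btA s i path res = res + cntA s i :=
  btA_accAux s s.length i path res (by omega)

theorem setlen_one (a : Char) : (PySem.Set.ofList [a]).length = 1 := by
  simp [PySem.Set.ofList, PySem.Set.add, PySem.Set.contains]

theorem setlen_two (a b : Char) : ((PySem.Set.ofList [a,b]).length = 1) ↔ b = a := by
  by_cases h : b = a <;> simp [PySem.Set.ofList, PySem.Set.add, PySem.Set.contains, h]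

theorem setlen_three (a b c : Char) :
    ((PySem.Set.ofList [a,b,c]).length = 1) ↔ b = a ∧ c = a := by
  by_cases h : b = a <;> by_cases h2 : c = a <;>
    simp [PySem.Set.ofList, PySem.Set.add, PySem.Set.contains, h, h2] <;>
    split <;> simp

theorem setlen_four (a b c d : Char) :
    ((PySem.Set.ofList [a,b,c,d]).length = 1) ↔ b = a ∧ c = a ∧ d = a := by
  by_cases h : b = a <;> by_cases h2 : c = a <;> by_cases h3 : d = a <;>
    simp [PySem.Set.ofList, PySem.Set.add, PySem.Set.contains, h, h2, h3] <;>
    repeat' (first | (split <;> simp_all) | simp_all)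

theorem takeDrop_one (s : List Char) (i : Nat) (h : i + 1 ≤ s.length) :
    (s.drop i).take 1 = [s[i]] := by
  rw [List.drop_eq_getElem_cons (show i < s.length by omega)]; rfl

theorem takeDrop_two (s : List Char) (i : Nat) (h : i + 2 ≤ s.length) :
    (s.drop i).take 2 = [s[i], s[i+1]] := by
  rw [List.drop_eq_getElem_cons (show i < s.length by omega),
      List.drop_eq_getElem_cons (show i + 1 < s.length by omega)]; rfl

theorem takeDrop_three (s : List Char) (i : Nat) (h : i + 3 ≤ s.length) :
    (s.drop i).take 3 = [s[i], s[i+1], s[i+2]] := by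
  rw [List.drop_eq_getElem_cons (show i < s.length by omega),
      List.drop_eq_getElem_cons (show i + 1 < s.length by omega),
      List.drop_eq_getElem_cons (show i + 1 + 1 < s.length by omega)]; rfl

theorem takeDrop_four (s : List Char) (i : Nat) (h : i + 4 ≤ s.length) :
    (s.drop i).take 4 = [s[i], s[i+1], s[i+2], s[i+3]] := by
  rw [List.drop_eq_getElem_cons (show i < s.length by omega),
      List.drop_eq_getElem_cons (show i + 1 < s.length by omega),
      List.drop_eq_getElem_cons (show i + 1 + 1 < s.length by omega),
      List.drop_eq_getElem_cons (show i + 1 + 1 + 1 < s.length by omega)]; rfl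

theorem okA_one (s : List Char) (i : Nat) : okA s i 1 ↔ i < s.length := by
  unfold okA
  rw [PySem.List.slice_natCast_add s i 1]
  by_cases h : i + 1 ≤ s.length
  · rw [takeDrop_one s i h]
    simp [setlen_one, h]
    omega
  · simp [h]; omega

theorem okA_two (s : List Char) (i : Nat) :
    okA s i 2 ↔ i + 1 < s.length ∧ s.getD (i+1) ' ' = s.getD i ' ' := by
  unfold okA
  rw [PySem.List.slice_natCast_add s i 2]
  by_cases h : i + 2 ≤ s.length
  · rw [takeDrop_two s i h, setlen_two,
        List.getD_eq_getElem s ' ' (show i + 1 < s.length by omega),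
        List.getD_eq_getElem s ' ' (show i < s.length by omega)]
    constructor
    · exact fun hb => ⟨by omega, hb.2⟩
    · exact fun hb => ⟨h, hb.2⟩
  · have h' : ¬ i + 1 < s.length := by omega
    simp [h, h']

theorem okA_three (s : List Char) (i : Nat) :
    okA s i 3 ↔ i + 2 < s.length ∧ s.getD (i+1) ' ' = s.getD i ' '
        ∧ s.getD (i+2) ' ' = s.getD i ' ' := by
  unfold okA
  rw [PySem.List.slice_natCast_add s i 3]
  by_cases h : i + 3 ≤ s.length
  · rw [takeDrop_three s i h, setlen_three,
        List.getD_eq_getElem s ' ' (show i + 1 < s.length by omega),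
        List.getD_eq_getElem s ' ' (show i + 2 < s.length by omega),
        List.getD_eq_getElem s ' ' (show i < s.length by omega)]
    constructor
    · exact fun hb => ⟨by omega, hb.2⟩
    · exact fun hb => ⟨h, hb.2⟩
  · have h' : ¬ i + 2 < s.length := by omega
    simp [h, h']

theorem okA_four (s : List Char) (i : Nat) :
    okA s i 4 ↔ i + 3 < s.length ∧ s.getD (i+1) ' ' = s.getD i ' '
        ∧ s.getD (i+2) ' ' = s.getD i ' ' ∧ s.getD (i+3) ' ' = s.getD i ' ' := by
  unfold okA
  rw [PySem.List.slice_natCast_add s i 4]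
  by_cases h : i + 4 ≤ s.length
  · rw [takeDrop_four s i h, setlen_four,
        List.getD_eq_getElem s ' ' (show i + 1 < s.length by omega),
        List.getD_eq_getElem s ' ' (show i + 2 < s.length by omega),
        List.getD_eq_getElem s ' ' (show i + 3 < s.length by omega),
        List.getD_eq_getElem s ' ' (show i < s.length by omega)]
    constructor
    · exact fun hb => ⟨by omega, hb.2⟩
    · exact fun hb => ⟨h, hb.2⟩
  · have h' : ¬ i + 3 < s.length := by omega
    simp [h, h']

theorem dpB_lt (s : List Char) (i : Nat) (h : i < s.length) :
    dpB s i = wsumB s i i (if s.getD i ' ' ∈ ['7','9'] then 4 else 3) (dpB s (i+1))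
        :: dpB s (i+1) := by
  rw [dpB, dif_neg (show ¬ s.length ≤ i by omega)]

theorem cntA_len (s : List Char) : cntA s s.length = 1 := by
  rw [cntA]
  conv_lhs => rw [btA]
  simp

set_option maxHeartbeats 1000000 in
theorem wsum_head (s : List Char) (i : Nat) (hi : i < s.length)
    (hrest : ∀ m : Nat, (dpB s (i+1)).getD m 0 =
        if i + 1 + m ≤ s.length then cntA s (i+1+m) else 0) :
    wsumB s i i (if s.getD i ' ' ∈ ['7','9'] then 4 else 3) (dpB s (i+1)) = cntA s i := by
  rw [cntA]
  conv_rhs => rw [btA]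
  simp only [if_neg (show ¬ i = s.length by omega), PySem.List.pyGetD_natCast]
  simp only [btA_acc, okA_one, okA_two, okA_three, okA_four]
  by_cases h79 : s.getD i ' ' ∈ ['7','9'] <;>
    simp only [if_pos, if_neg, h79, if_true, if_false]
  · rw [wsumB]; rw [wsumB]; rw [wsumB]; rw [wsumB]; rw [wsumB]
    simp only [show i+1+1 = i+2 from rfl, show i+2+1 = i+3 from rfl, show i+3+1 = i+4 from rfl,
      Nat.add_sub_cancel_left, Nat.sub_self, hrest, Nat.add_zero,
      Nat.lt_iff_add_one_le, zero_add]
    generalize cntA s (i+1) = c1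
    generalize cntA s (i+2) = c2
    generalize cntA s (i+3) = c3
    generalize cntA s (i+4) = c4
    generalize hg1 : s.getD (i+1) ' ' = g1
    generalize hg2 : s.getD (i+2) ' ' = g2
    generalize hg3 : s.getD (i+3) ' ' = g3
    generalize hg0 : s.getD i ' ' = g0
    clear hrest hg0 hg1 hg2 hg3 h79
    by_cases a2 : i + 2 ≤ s.length <;>
    by_cases a3 : i + 3 ≤ s.length <;>
    by_cases a4 : i + 4 ≤ s.length <;>
    by_cases b1 : g1 = g0 <;>
    by_cases b2 : g2 = g0 <;>
    by_cases b3 : g3 = g0 <;>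
      simp_all <;> (try split_ifs) <;> first | (exfalso; omega) | ring
  · rw [wsumB]; rw [wsumB]; rw [wsumB]; rw [wsumB]
    simp only [show i+1+1 = i+2 from rfl, show i+2+1 = i+3 from rfl,
      Nat.add_sub_cancel_left, Nat.sub_self, hrest, Nat.add_zero,
      Nat.lt_iff_add_one_le, zero_add]
    generalize cntA s (i+1) = c1
    generalize cntA s (i+2) = c2
    generalize cntA s (i+3) = c3
    generalize hg1 : s.getD (i+1) ' ' = g1
    generalize hg2 : s.getD (i+2) ' ' = g2
    generalize hg0 : s.getD i ' ' = g0
    clear hrest hg0 hg1 hg2 h79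
    by_cases a2 : i + 2 ≤ s.length <;>
    by_cases a3 : i + 3 ≤ s.length <;>
    by_cases b1 : g1 = g0 <;>
    by_cases b2 : g2 = g0 <;>
      simp_all <;> (try split_ifs) <;> first | (exfalso; omega) | ring

theorem dpB_getD_len (s : List Char) (j : Nat) :
    (dpB s s.length).getD j 0
      = if s.length + j ≤ s.length then cntA s (s.length + j) else 0 := by
  rw [dpB, dif_pos (le_refl _)]
  cases j with
  | zero => simpa using (cntA_len s).symm
  | succ j =>
    rw [if_neg (by omega)]
    rfl

theorem dpB_getD_aux (s : List Char) :
    ∀ (d i j : Nat), s.length - i ≤ d → i ≤ s.length →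
      (dpB s i).getD j 0 = if i + j ≤ s.length then cntA s (i + j) else 0 := by
  intro d
  induction d with
  | zero =>
    intro i j hd hi
    have : i = s.length := by omega
    subst this
    exact dpB_getD_len s j
  | succ d ih =>
    intro i j hd hi
    by_cases hge : s.length ≤ i
    · have : i = s.length := by omega
      subst this
      exact dpB_getD_len s j
    · have hi' : i < s.length := by omega
      rw [dpB_lt s i hi']
      cases j with
      | zero =>
        simp only [List.getD_cons_zero, Nat.add_zero]
        rw [show (if i ≤ s.length then cntA s i else 0) = cntA s i from if_pos (by omega)]
        exact wsum_head s i hi' (fun m => ih (i+1) m (by omega) (by omega))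
      | succ j =>
        simp only [List.getD_cons_succ]
        rw [ih (i+1) j (by omega) (by omega), show i + 1 + j = i + (j+1) from by omega]

theorem dpB_getD (s : List Char) (i j : Nat) (hi : i ≤ s.length) :
    (dpB s i).getD j 0 = if i + j ≤ s.length then cntA s (i + j) else 0 :=
  dpB_getD_aux s s.length i j (by omega) hi


-- ===== VERDICT (by name: the statement is the Claim_ definition above) =====
theorem countTexts_spec : Claim_equal_countTexts := by
  intro p _
  unfold Spec_countTexts countTexts countTexts_alt
  rw [dpB_getD p.toList 0 0 (by omega)]
  simp [cntA]
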